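-- pv_equiv track=rewrite | github.com/javiermapelli/ASCON-128a-Educational-Visualizer | ASCON-128a.py | to_binary_with_highlights
-- ===== SOURCE A (Python) =====
-- from typing import List, Tuple, Dict, Optional
--
-- def to_binary_with_highlights(old_val: int, new_val: int, bits: int = 64, group_by: int = 8) -> Tuple[str, List[int]]:
--     """
--     Convierte valores a binario resaltando bits que cambiaron.
--
--     Returns:
--         Tuple con (string binario formateado, lista de posiciones de bits cambiados)
--     """
--     old_bin = format(old_val, f'0{bits}b')
--     new_bin = format(new_val, f'0{bits}b')
--
--     changed_positions = []
--     formatted_old = ""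
--     formatted_new = ""
--
--     for i, (old_bit, new_bit) in enumerate(zip(old_bin, new_bin)):
--         # Agregar espacio cada group_by bits
--         if i > 0 and i % group_by == 0:
--             formatted_old += " "
--             formatted_new += " "
--
--         formatted_old += old_bit
--         formatted_new += new_bit
--
--         if old_bit != new_bit:
--             changed_positions.append(i)
--
--     return (formatted_old, formatted_new, changed_positions)
-- ===== SOURCE B (Python) =====
-- def to_binary_with_highlights(old_val: int, new_val: int, bits: int = 64, group_by: int = 8):
--     old_bin = format(old_val, f'0{bits}b')
--     new_bin = format(new_val, f'0{bits}b')
--     pairs = list(zip(old_bin, new_bin))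
--     changed_positions = [i for i, (o, n) in enumerate(pairs) if o != n]
--     chunks = [pairs[i:i + group_by] for i in range(0, len(pairs), group_by)]
--     formatted_old = " ".join("".join(o for o, _ in ch) for ch in chunks)
--     formatted_new = " ".join("".join(n for _, n in ch) for ch in chunks)
--     return (formatted_old, formatted_new, changed_positions)
-- ===== Notes on version B (the rewrite author's own statement) =====
-- stated objective: alternative
-- what changed: A fuses grouping and diffing into one indexed character loop growing three string accumulators; B pairs the two bit strings once with zip, derives the changed positions by a comprehension over the pairs, chunks the pair list with range(0, len, group_by) slices and renders each side by joining the chunks; Pre_ keeps the natural domain bits >= 0 and group_by >= 1 (A raises ValueError for negative bits and ZeroDivisionError for group_by = 0 except on one-character outputs; …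
-- outside the precondition, e.g. on to_binary_with_highlights(0, 0, 1, 0): A returns ('0', '0', []), B raises ValueError; on to_binary_with_highlights(5, 3, 8, -3): A returns ('000 001 01', '000 000 11', [5, 6]), B returns ('', '', [5, 6])
import Mathlib
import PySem

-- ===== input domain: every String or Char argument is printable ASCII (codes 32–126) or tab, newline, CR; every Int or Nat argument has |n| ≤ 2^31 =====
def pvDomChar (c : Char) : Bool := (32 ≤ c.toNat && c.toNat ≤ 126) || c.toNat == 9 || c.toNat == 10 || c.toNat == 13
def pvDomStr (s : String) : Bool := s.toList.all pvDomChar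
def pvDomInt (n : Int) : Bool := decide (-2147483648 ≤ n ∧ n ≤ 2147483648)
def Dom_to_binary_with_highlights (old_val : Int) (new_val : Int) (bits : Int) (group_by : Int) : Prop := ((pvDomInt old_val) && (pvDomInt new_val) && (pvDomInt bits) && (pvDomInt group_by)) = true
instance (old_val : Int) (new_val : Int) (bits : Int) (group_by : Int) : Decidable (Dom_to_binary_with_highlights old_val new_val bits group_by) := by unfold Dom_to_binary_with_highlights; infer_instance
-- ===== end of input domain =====

-- B pairs the bit strings once with zip, diffs the pairs by a comprehension and renders each side
-- by joining width-group_by chunks of the pair list, instead of A's fused indexed character loop.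

-- ===== PORT A =====
-- format(v, f'0{bits}b') = format(v, 'b') zero-padded to total width `bits` with the sign kept
-- in front, which is exactly zfill; exact for bits ≥ 0 (negative bits raise in Python, outside Pre_).
def pvFmtBin (v : Int) (bits : Int) : List Char :=
  PySem.Chars.zfill (PySem.Int.toBinChars v) bits

-- one iteration of A's for-loop (state: formatted_old, formatted_new, changed_positions)
def pvStepA (gb : Int) (st : List Char × List Char × List Int) (e : Int × Char × Char) :
    List Char × List Char × List Int :=
  let fo := if 0 < e.1 ∧ PySem.Int.mod e.1 gb = 0 then st.1 ++ [' '] else st.1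
  let fn := if 0 < e.1 ∧ PySem.Int.mod e.1 gb = 0 then st.2.1 ++ [' '] else st.2.1
  (fo ++ [e.2.1], fn ++ [e.2.2], if e.2.1 ≠ e.2.2 then st.2.2 ++ [e.1] else st.2.2)

def to_binary_with_highlights (old_val : Int) (new_val : Int) (bits : Int) (group_by : Int) :
    String × String × List Int :=
  let old_bin := pvFmtBin old_val bits
  let new_bin := pvFmtBin new_val bits
  let r := (PySem.List.enumerate (old_bin.zip new_bin)).foldl (pvStepA group_by) ([], [], [])
  (String.ofList r.1, String.ofList r.2.1, r.2.2)

-- ===== PORT B =====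
def to_binary_with_highlights_alt (old_val : Int) (new_val : Int) (bits : Int) (group_by : Int) :
    String × String × List Int :=
  let old_bin := pvFmtBin old_val bits
  let new_bin := pvFmtBin new_val bits
  let pairs := old_bin.zip new_bin
  let changed := ((PySem.List.enumerate pairs).filter (fun e => e.2.1 ≠ e.2.2)).map Prod.fst
  let chunks := (PySem.List.pyRange 0 (pairs.length : Int) group_by).map
      (fun i => PySem.List.slice pairs (some i) (some (i + group_by)))
  (String.ofList (PySem.Chars.join [' '] (chunks.map (fun ch => ch.map Prod.fst))),
   String.ofList (PySem.Chars.join [' '] (chunks.map (fun ch => ch.map Prod.snd))),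
   changed)

-- ===== PRECONDITION & SPEC =====
-- Pre_ keeps the natural domain: bits ≥ 0 (A raises ValueError on a negative format width) and
-- group_by ≥ 1 (group_by = 0 raises ZeroDivisionError in A except on one-character outputs, where
-- B's range step raises ValueError; a negative grouping width is outside the natural domain — A's
-- grouping there is an accident of Python's modulo sign rule, while B's range yields no chunks).
def Pre_to_binary_with_highlights (old_val : Int) (new_val : Int) (bits : Int) (group_by : Int) : Prop :=
  0 ≤ bits ∧ 1 ≤ group_by
instance (old_val : Int) (new_val : Int) (bits : Int) (group_by : Int) :
    Decidable (Pre_to_binary_with_highlights old_val new_val bits group_by) := by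
  unfold Pre_to_binary_with_highlights; infer_instance

def pvWitness_to_binary_with_highlights : Int × Int × Int × Int := (5, -3, 8, 3)

def Spec_to_binary_with_highlights (old_val : Int) (new_val : Int) (bits : Int) (group_by : Int) (out : String × String × List Int) : Prop := out = to_binary_with_highlights_alt old_val new_val bits group_by
instance (old_val : Int) (new_val : Int) (bits : Int) (group_by : Int) (out : String × String × List Int) : Decidable (Spec_to_binary_with_highlights old_val new_val bits group_by out) := by unfold Spec_to_binary_with_highlights; infer_instance

-- ===== CLAIM (what is proved, stated in full; the proofs are below) =====
def Claim_equal_to_binary_with_highlights : Prop := ∀ (old_val : Int) (new_val : Int) (bits : Int) (group_by : Int), Dom_to_binary_with_highlights old_val new_val bits group_by → Pre_to_binary_with_highlights old_val new_val bits group_by → Spec_to_binary_with_highlights old_val new_val bits group_by (to_binary_with_highlights old_val new_val bits group_by)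

-- ===== LEMMAS AND PROOFS =====

-- chunks of width m+1
def pvChunks {α : Type} (m : Nat) : List α → List (List α)
  | [] => []
  | x :: xs => (x :: xs.take m) :: pvChunks m (xs.drop m)
  termination_by s => s.length
  decreasing_by simp

-- the changed-positions list of A's loop, starting at absolute index k
def pvDiffs : List (Char × Char) → Int → List Int
  | [], _ => []
  | (a, b) :: t, k => (if a ≠ b then [k] else []) ++ pvDiffs t (k + 1)

-- grouped rendering of a bit string, width gn = m+1
def pvG (m : Nat) (s : List Char) : List Char := PySem.Chars.join [' '] (pvChunks m s)

theorem pvSpCond (gb : Int) (hgb : gb ≠ 0) (k : Nat) :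
    (0 < (k : Int) ∧ PySem.Int.mod (k : Int) gb = 0) ↔ (0 < k ∧ gb.natAbs ∣ k) := by
  rw [PySem.Int.mod_eq_zero_iff_dvd]
  have hd : gb ∣ (k : Int) ↔ gb.natAbs ∣ k := by
    rw [← Int.natAbs_dvd_natAbs]; simp
  rw [hd]
  constructor <;> rintro ⟨h1, h2⟩ <;> exact ⟨by exact_mod_cast h1, h2⟩

theorem pvDiffs_append (a b : List (Char × Char)) (k : Int) :
    pvDiffs (a ++ b) k = pvDiffs a k ++ pvDiffs b (k + a.length) := by
  induction a generalizing k with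
  | nil => simp [pvDiffs]
  | cons x t ih =>
    obtain ⟨x1, x2⟩ := x
    simp only [List.cons_append, pvDiffs, ih, List.length_cons, List.append_assoc]
    push_cast
    ring_nf

-- A's loop over a span whose interior indices are never divisible by gn = |gb|
theorem pvFold_interior (gb : Int) (hgb : gb ≠ 0)
    (q : List (Char × Char)) (k : Nat)
    (h : ∀ j : Nat, j < q.length → 0 < k + j → ¬ gb.natAbs ∣ (k + j)) :
    ∀ fo fn ps, (PySem.List.enumerate q (k : Int)).foldl (pvStepA gb) (fo, fn, ps)
      = (fo ++ q.map Prod.fst, fn ++ q.map Prod.snd, ps ++ pvDiffs q (k : Int)) := by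
  induction q generalizing k with
  | nil => simp [PySem.List.enumerate_nil, pvDiffs]
  | cons x t ih =>
    intro fo fn ps
    obtain ⟨x1, x2⟩ := x
    rw [PySem.List.enumerate_cons, List.foldl_cons]
    have hsp : ¬ (0 < ((k : Int)) ∧ PySem.Int.mod (k : Int) gb = 0) := by
      rw [pvSpCond gb hgb k]
      rintro ⟨h1, h2⟩
      exact h 0 (by simp) (by omega) (by simpa using h2)
    have hk1 : ((k : Int) + 1) = ((k + 1 : Nat) : Int) := by push_cast; ring
    have hnext : ∀ j : Nat, j < t.length → 0 < (k + 1) + j → ¬ gb.natAbs ∣ ((k + 1) + j) := by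
      intro j hj hpos
      have := h (j + 1) (by simp; omega) (by omega)
      rwa [show k + 1 + j = k + (j + 1) from by ring]
    rw [hk1, ih (k + 1) hnext]
    simp only [pvStepA, if_neg hsp, pvDiffs, ← hk1]
    by_cases hne : x1 = x2
    · simp [hne, List.append_assoc]
    · simp [hne, List.append_assoc]

-- A's loop over one chunk: q starts at a multiple of gn and fits inside the chunk
theorem pvFold_chunk (gb : Int) (hgb : gb ≠ 0)
    (q : List (Char × Char)) (k : Nat) (hk : gb.natAbs ∣ k) (hlen : q.length ≤ gb.natAbs) :
    ∀ fo fn ps, (PySem.List.enumerate q (k : Int)).foldl (pvStepA gb) (fo, fn, ps)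
      = (fo ++ (if 0 < k ∧ q ≠ [] then [' '] else []) ++ q.map Prod.fst,
         fn ++ (if 0 < k ∧ q ≠ [] then [' '] else []) ++ q.map Prod.snd,
         ps ++ pvDiffs q (k : Int)) := by
  intro fo fn ps
  have hgn : 1 ≤ gb.natAbs := by omega
  cases q with
  | nil => simp [PySem.List.enumerate_nil, pvDiffs]
  | cons x t =>
    obtain ⟨x1, x2⟩ := x
    rw [PySem.List.enumerate_cons, List.foldl_cons]
    have hk1 : ((k : Int) + 1) = ((k + 1 : Nat) : Int) := by push_cast; ring
    have hnext : ∀ j : Nat, j < t.length → 0 < (k + 1) + j → ¬ gb.natAbs ∣ ((k + 1) + j) := by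
      intro j hj _
      intro hdvd
      have h1j : gb.natAbs ∣ (1 + j) := by
        have : k + 1 + j = k + (1 + j) := by ring
        rw [this] at hdvd
        exact (Nat.dvd_add_right hk).mp hdvd
      have : 1 + j < gb.natAbs := by simp at hlen; omega
      have := Nat.le_of_dvd (by omega) h1j
      omega
    rw [hk1, pvFold_interior gb hgb t (k + 1) hnext]
    have hsp : (0 < ((k : Int)) ∧ PySem.Int.mod (k : Int) gb = 0) ↔ 0 < k := by
      rw [pvSpCond gb hgb k]
      constructor
      · rintro ⟨h1, _⟩; exact h1
      · intro h1; exact ⟨h1, hk⟩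
    simp only [pvStepA, pvDiffs, ← hk1]
    by_cases hkpos : 0 < k
    · have hmod := ((pvSpCond gb hgb k).mpr ⟨hkpos, hk⟩).2
      by_cases hne : x1 = x2
      · simp [hne, hmod, hkpos, List.append_assoc]
      · simp [hne, hmod, hkpos, List.append_assoc]
    · have hk0 : k = 0 := by omega
      by_cases hne : x1 = x2
      · simp [hne, hk0, List.append_assoc]
      · simp [hne, hk0, List.append_assoc]

theorem pvChunks_single {α : Type} (m : Nat) (s : List α) (h0 : s ≠ []) (h : s.length ≤ m + 1) :
    pvChunks m s = [s] := by
  cases s with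
  | nil => exact absurd rfl h0
  | cons x xs =>
    rw [pvChunks]
    have h1 : xs.take m = xs := List.take_of_length_le (by simp at h; omega)
    have h2 : xs.drop m = [] := List.drop_eq_nil_of_le (by simp at h; omega)
    simp [h1, h2, pvChunks]

theorem pvChunks_append {α : Type} (m : Nat) (u v : List α) (h : u.length = m + 1) :
    pvChunks m (u ++ v) = u :: pvChunks m v := by
  cases u with
  | nil => simp at h
  | cons x xs =>
    rw [List.cons_append, pvChunks]
    have hx : xs.length = m := by simp at h; omega
    rw [List.take_left' hx, List.drop_left' hx]

theorem pvChunks_ne_nil {α : Type} (m : Nat) (s : List α) (h : s ≠ []) : pvChunks m s ≠ [] := by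
  cases s with
  | nil => exact absurd rfl h
  | cons x xs => rw [pvChunks]; simp

theorem pvJoin_cons (sep : List Char) (u : List Char) (rest : List (List Char)) (h : rest ≠ []) :
    PySem.Chars.join sep (u :: rest) = u ++ sep ++ PySem.Chars.join sep rest := by
  cases rest with
  | nil => exact absurd rfl h
  | cons q r => exact PySem.Chars.join_cons_cons sep u q r

-- A's whole loop, processed chunk by chunk, starting at chunk number c
theorem pvFold_main (gb : Int) (hgb : gb ≠ 0) :
    ∀ (n : Nat) (p : List (Char × Char)), p.length ≤ n → ∀ (c : Nat) fo fn ps,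
    (PySem.List.enumerate p ((c * gb.natAbs : Nat) : Int)).foldl (pvStepA gb) (fo, fn, ps)
      = (fo ++ (if 0 < c ∧ p ≠ [] then [' '] else []) ++ pvG (gb.natAbs - 1) (p.map Prod.fst),
         fn ++ (if 0 < c ∧ p ≠ [] then [' '] else []) ++ pvG (gb.natAbs - 1) (p.map Prod.snd),
         ps ++ pvDiffs p ((c * gb.natAbs : Nat) : Int)) := by
  have hgn : 1 ≤ gb.natAbs := by omega
  intro n
  induction n with
  | zero =>
    intro p hp c fo fn ps
    have : p = [] := List.length_eq_zero_iff.mp (by omega)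
    subst this
    simp [PySem.List.enumerate_nil, pvDiffs, pvG, pvChunks, PySem.Chars.join_nil]
  | succ n ih =>
    intro p hp c fo fn ps
    by_cases hpnil : p = []
    · subst hpnil
      simp [PySem.List.enumerate_nil, pvDiffs, pvG, pvChunks, PySem.Chars.join_nil]
    by_cases hple : p.length ≤ gb.natAbs
    · -- a single (possibly short) chunk
      rw [pvFold_chunk gb hgb p (c * gb.natAbs) (Dvd.intro c (Nat.mul_comm _ _)) hple]
      have hfst : pvG (gb.natAbs - 1) (p.map Prod.fst) = p.map Prod.fst := by
        rw [pvG, pvChunks_single _ _ (by simpa using hpnil) (by simp; omega), PySem.Chars.join_singleton]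
      have hsnd : pvG (gb.natAbs - 1) (p.map Prod.snd) = p.map Prod.snd := by
        rw [pvG, pvChunks_single _ _ (by simpa using hpnil) (by simp; omega), PySem.Chars.join_singleton]
      rw [hfst, hsnd]
      by_cases hc : 0 < c
      · simp [hpnil, hc, Nat.mul_pos hc (show 0 < gb.natAbs from by omega)]
      · have hc0 : c = 0 := by omega
        subst hc0
        simp [hpnil]
    · -- peel the first full chunk
      have hsplit : p = p.take gb.natAbs ++ p.drop gb.natAbs := (List.take_append_drop _ p).symm
      set a := p.take gb.natAbs with ha
      set b := p.drop gb.natAbs with hb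
      have hal : a.length = gb.natAbs := by rw [ha]; simp; omega
      have hbl : b.length = p.length - gb.natAbs := by rw [hb]; simp
      have hbnil : b ≠ [] := by
        intro hbe; rw [hbe] at hbl; simp at hbl; omega
      rw [hsplit, PySem.List.enumerate_append, List.foldl_append]
      rw [pvFold_chunk gb hgb a (c * gb.natAbs) (Dvd.intro c (Nat.mul_comm _ _)) (le_of_eq hal)]
      have hoff : ((c * gb.natAbs : Nat) : Int) + a.length = (((c + 1) * gb.natAbs : Nat) : Int) := by
        rw [hal]; push_cast; ring
      rw [hoff, ih b (by omega) (c + 1)]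
      have hanil : a ≠ [] := by intro hae; rw [hae] at hal; simp at hal; omega
      have hGf : pvG (gb.natAbs - 1) ((a ++ b).map Prod.fst)
          = a.map Prod.fst ++ [' '] ++ pvG (gb.natAbs - 1) (b.map Prod.fst) := by
        rw [List.map_append, pvG, pvChunks_append _ _ _ (by simp [hal]; omega),
          pvJoin_cons _ _ _ (pvChunks_ne_nil _ _ (by simpa using hbnil)), pvG]
      have hGs : pvG (gb.natAbs - 1) ((a ++ b).map Prod.snd)
          = a.map Prod.snd ++ [' '] ++ pvG (gb.natAbs - 1) (b.map Prod.snd) := by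
        rw [List.map_append, pvG, pvChunks_append _ _ _ (by simp [hal]; omega),
          pvJoin_cons _ _ _ (pvChunks_ne_nil _ _ (by simpa using hbnil)), pvG]
      rw [hGf, hGs, pvDiffs_append, hoff]
      simp [hanil, hbnil, hgb, show 0 < c + 1 from by omega, List.append_assoc]

-- B's diff comprehension is A's changed-positions list
theorem pvFilterEnum (p : List (Char × Char)) (k : Int) :
    ((PySem.List.enumerate p k).filter (fun e => e.2.1 ≠ e.2.2)).map Prod.fst = pvDiffs p k := by
  induction p generalizing k with
  | nil => simp [PySem.List.enumerate_nil, pvDiffs]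
  | cons x t ih =>
    obtain ⟨x1, x2⟩ := x
    rw [PySem.List.enumerate_cons, List.filter_cons]
    by_cases hne : x1 = x2
    · simpa [pvDiffs, hne] using ih (k + 1)
    · simpa [pvDiffs, hne] using ih (k + 1)

-- peel the first width-gn block off range(0, L, gn)
theorem pvRangeStep (gn : Nat) (hgn : 1 ≤ gn) (L : Nat) (hL : 0 < L) :
    PySem.List.pyRange 0 (L : Int) (gn : Int)
      = 0 :: (PySem.List.pyRange 0 ((L - gn : Nat) : Int) (gn : Int)).map (· + (gn : Int)) := by
  have hgn' : (0 : Int) < (gn : Int) := by exact_mod_cast hgn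
  rw [PySem.List.pyRange_of_pos 0 (L : Int) hgn', PySem.List.pyRange_of_pos 0 ((L - gn : Nat) : Int) hgn']
  have hcnt : ∀ (M : Nat), 0 < M →
      (if (0 : Int) < (M : Int) then (((M : Int) - 0 + (gn : Int) - 1) / (gn : Int)).toNat else 0)
        = (M - 1) / gn + 1 := by
    intro M hM
    rw [if_pos (by exact_mod_cast hM)]
    have h1 : ((M : Int) - 0 + (gn : Int) - 1) = (((M - 1) + gn : Nat) : Int) := by
      push_cast [Nat.cast_sub (by omega : 1 ≤ M)]
      ring
    rw [h1, show (((M - 1 + gn : Nat) : Int) / (gn : Int)) = (((M - 1 + gn) / gn : Nat) : Int) from by exact_mod_cast rfl, Int.toNat_natCast]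
    rw [Nat.add_div_right _ (by omega)]
  rw [hcnt L hL]
  by_cases hle : L ≤ gn
  · have h0 : L - gn = 0 := by omega
    rw [h0]
    simp only [Nat.cast_zero, lt_self_iff_false, if_false, List.range_zero, List.map_nil]
    have : (L - 1) / gn = 0 := Nat.div_eq_of_lt (by omega)
    rw [this]
    simp
  · have hpos : 0 < L - gn := by omega
    rw [hcnt (L - gn) hpos]
    have hcount : (L - 1) / gn = (L - gn - 1) / gn + 1 := by
      have : L - 1 = (L - gn - 1) + gn := by omega
      rw [this, Nat.add_div_right _ (by omega)]
    rw [hcount, List.range_succ_eq_map]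
    simp only [List.map_cons, List.map_map]
    congr 1
    all_goals simp
    all_goals intro a _
    all_goals ring

-- B's slice-of-range comprehension is the chunk list
theorem pvRangeChunksAux {α : Type} (gn : Nat) (hgn : 1 ≤ gn) :
    ∀ (n : Nat) (t : List α), t.length ≤ n →
    (PySem.List.pyRange 0 (t.length : Int) (gn : Int)).map
        (fun i => PySem.List.slice t (some i) (some (i + gn)))
      = pvChunks (gn - 1) t := by
  have hgn' : (0 : Int) < (gn : Int) := by exact_mod_cast hgn
  intro n
  induction n with
  | zero =>
    intro t ht
    have : t = [] := List.length_eq_zero_iff.mp (by omega)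
    subst this
    simp only [List.length_nil, Nat.cast_zero]
    rw [PySem.List.pyRange_of_pos 0 0 hgn']
    simp [pvChunks]
  | succ n ih =>
    intro t ht
    cases t with
    | nil =>
      simp only [List.length_nil, Nat.cast_zero]
      rw [PySem.List.pyRange_of_pos 0 0 hgn']
      simp [pvChunks]
    | cons x xs =>
      rw [pvRangeStep gn hgn (x :: xs).length (by simp)]
      rw [List.map_cons, List.map_map]
      have hhead : PySem.List.slice (x :: xs) (some 0) (some (0 + (gn : Int))) = x :: xs.take (gn - 1) := by
        rw [zero_add, PySem.List.slice_zero_start, PySem.List.slice_to _ (le_of_lt hgn')]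
        rw [Int.toNat_natCast]
        cases gn with
        | zero => omega
        | succ m => simp
      have htail : ((PySem.List.pyRange 0 (((x :: xs).length - gn : Nat) : Int) (gn : Int)).map
            ((fun i => PySem.List.slice (x :: xs) (some i) (some (i + gn))) ∘ (· + (gn : Int))))
          = pvChunks (gn - 1) (xs.drop (gn - 1)) := by
        have hmc : ∀ i ∈ PySem.List.pyRange 0 (((x :: xs).length - gn : Nat) : Int) (gn : Int),
            ((fun i => PySem.List.slice (x :: xs) (some i) (some (i + gn))) ∘ (· + (gn : Int))) i
              = PySem.List.slice (xs.drop (gn - 1)) (some i) (some (i + gn)) := by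
          intro i hi
          have h0i : 0 ≤ i := ((PySem.List.mem_pyRange_iff_of_pos hgn' i).mp hi).1
          simp only [Function.comp_apply]
          rw [PySem.List.slice_toNat _ (by omega) (by omega), PySem.List.slice_toNat _ h0i (by omega)]
          have hd : List.drop (i + gn).toNat (x :: xs) = List.drop i.toNat (List.drop (gn - 1) xs) := by
            rw [List.drop_drop, show (i + gn).toNat = ((gn - 1) + i.toNat) + 1 from by omega,
              List.drop_succ_cons]
          rw [hd]
          congr 1
          omega
        rw [List.map_congr_left hmc]
        have hlen : ((x :: xs).length - gn : Nat) = (xs.drop (gn - 1)).length := by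
          simp; omega
        rw [hlen, ih (xs.drop (gn - 1)) (by simp at ht ⊢; omega)]
      rw [hhead, htail, pvChunks]

theorem pvRangeChunks {α : Type} (gn : Nat) (hgn : 1 ≤ gn) (t : List α) :
    (PySem.List.pyRange 0 (t.length : Int) (gn : Int)).map
        (fun i => PySem.List.slice t (some i) (some (i + gn)))
      = pvChunks (gn - 1) t :=
  pvRangeChunksAux gn hgn t.length t le_rfl

-- chunking commutes with an element-wise map
theorem pvChunks_map {α β : Type} (f : α → β) (m : Nat) :
    ∀ (n : Nat) (l : List α), l.length ≤ n →
    pvChunks m (l.map f) = (pvChunks m l).map (List.map f) := by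
  intro n
  induction n with
  | zero =>
    intro l hl
    have : l = [] := List.length_eq_zero_iff.mp (by omega)
    subst this
    simp [pvChunks]
  | succ n ih =>
    intro l hl
    cases l with
    | nil => simp [pvChunks]
    | cons x xs =>
      rw [List.map_cons, pvChunks, pvChunks, ← List.map_take, ← List.map_drop,
        ih (xs.drop m) (by simp at hl ⊢; omega)]
      simp

-- ===== VERDICT (by name: the statement is the Claim_ definition above) =====
theorem to_binary_with_highlights_spec : Claim_equal_to_binary_with_highlights := by
  unfold Claim_equal_to_binary_with_highlights
  intro ov nv bits gb _ hpre
  obtain ⟨hbits, hgb1⟩ := hpre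
  have hgb : gb ≠ 0 := by omega
  unfold Spec_to_binary_with_highlights
  unfold to_binary_with_highlights to_binary_with_highlights_alt
  simp only []
  set p := (pvFmtBin ov bits).zip (pvFmtBin nv bits) with hp
  set gn := gb.natAbs with hgndef
  have hgncast : ((gn : Nat) : Int) = gb := Int.natAbs_of_nonneg (by omega)
  have hgn1 : 1 ≤ gn := Int.natAbs_pos.mpr hgb
  -- A's loop, chunk by chunk
  have hA := pvFold_main gb hgb p.length p le_rfl 0 [] [] []
  rw [show ((0 * gb.natAbs : Nat) : Int) = (0 : Int) from by simp] at hA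
  simp only [show ¬ (0 < 0 ∧ p ≠ []) from by simp, if_false, List.nil_append] at hA
  rw [hA]
  -- B's chunk list
  have hch : (PySem.List.pyRange 0 (p.length : Int) gb).map
      (fun i => PySem.List.slice p (some i) (some (i + gb))) = pvChunks (gn - 1) p := by
    rw [← hgncast]
    exact pvRangeChunks gn hgn1 p
  rw [hch]
  -- rendering each side = A's grouped string
  have hmf : (pvChunks (gn - 1) p).map (fun ch => ch.map Prod.fst)
      = pvChunks (gn - 1) (p.map Prod.fst) :=
    (pvChunks_map Prod.fst (gn - 1) p.length p le_rfl).symm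
  have hms : (pvChunks (gn - 1) p).map (fun ch => ch.map Prod.snd)
      = pvChunks (gn - 1) (p.map Prod.snd) :=
    (pvChunks_map Prod.snd (gn - 1) p.length p le_rfl).symm
  rw [hmf, hms]
  -- B's diff comprehension
  rw [pvFilterEnum p 0]
  rfl
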